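-- pv_equiv track=rewrite | github.com/espressojuice/cloudmonitor | edge/scanner/scanner.py | expand_cidr
-- ===== SOURCE A (Python) =====
-- def expand_cidr(cidr):
--     """Expand CIDR notation to list of IPs."""
--     if '/' not in cidr:
--         return [cidr]
--
--     ip_part, prefix = cidr.split('/')
--     prefix = int(prefix)
--
--     if prefix < 24:
--         prefix = 24  # Limit to /24 for safety
--
--     ip_parts = [int(x) for x in ip_part.split('.')]
--     base_ip = (ip_parts[0] << 24) + (ip_parts[1] << 16) + (ip_parts[2] << 8) + ip_parts[3]
--
--     num_hosts = 2 ** (32 - prefix)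
--     network = base_ip & (0xFFFFFFFF << (32 - prefix))
--
--     ips = []
--     for i in range(1, num_hosts - 1):  # Skip network and broadcast
--         ip_int = network + i
--         ip_str = f"{(ip_int >> 24) & 0xFF}.{(ip_int >> 16) & 0xFF}.{(ip_int >> 8) & 0xFF}.{ip_int & 0xFF}"
--         ips.append(ip_str)
--
--     return ips
-- ===== SOURCE B (Python) =====
-- def expand_cidr(cidr):
--     """Expand CIDR notation to list of IPs."""
--     if '/' not in cidr:
--         return [cidr]
--
--     ip_part, prefix_str = cidr.split('/')
--     size = 2 ** (32 - max(int(prefix_str), 24))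
--
--     octets = [int(x) for x in ip_part.split('.')]
--     head = ".".join(str(o) for o in octets[:3]) + "."
--     low = octets[3] - octets[3] % size
--
--     block = [head + str(n) for n in range(low, low + size)]
--     return block[1:-1]  # drop network and broadcast addresses
-- ===== Notes on version B (the rewrite author's own statement) =====
-- stated objective: simpler
-- what changed: B drops A's 32-bit integer and all per-host shifting/masking: it keeps the three leading octets as a joined constant prefix string, enumerates the whole aligned block of last-octet values (low = octet - octet % size), and slices off the network and broadcast ends with block[1:-1] instead of A's range(1, num_hosts - 1) loop that re-extracts all four octets of every address; Pre_ excludes malformed CIDRs with an octet outside 0..255, a corner nobody specifies, where A's accidental carry-and-wrap of the excess into neighbouring octets and B's verbatim octets are equally defensible.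
-- outside the precondition, e.g. on expand_cidr('1.2.3.300/30'): A returns ['1.2.4.45', '1.2.4.46'], B returns ['1.2.3.301', '1.2.3.302']
import Mathlib
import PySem

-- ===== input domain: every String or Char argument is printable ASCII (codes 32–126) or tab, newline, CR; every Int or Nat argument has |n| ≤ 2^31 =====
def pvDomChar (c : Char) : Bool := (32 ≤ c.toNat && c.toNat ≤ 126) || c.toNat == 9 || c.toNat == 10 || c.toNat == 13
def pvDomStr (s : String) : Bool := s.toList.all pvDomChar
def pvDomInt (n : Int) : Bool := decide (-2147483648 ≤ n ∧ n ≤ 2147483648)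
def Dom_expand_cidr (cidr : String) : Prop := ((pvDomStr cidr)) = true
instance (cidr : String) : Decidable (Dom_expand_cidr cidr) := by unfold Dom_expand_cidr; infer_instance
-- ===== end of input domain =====

-- B drops A's 32-bit integer and all bit shifting/masking: it keeps the three leading
-- octets as a joined prefix string, enumerates the whole aligned block of last-octet
-- values, and slices off the network and broadcast ends; objective: simpler.
-- Pre_ excludes malformed CIDRs with an octet outside 0..255 (see the Pre_ comment).

-- ===== PORT A =====
def expand_cidr (cidr : String) : List String :=
  if PySem.Str.isIn "/" cidr = false then [cidr] else
  match PySem.Str.split? cidr "/" with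
  | some [ip_part, prefixStr] =>
    match PySem.Int.ofStr? prefixStr with
    | some prefix0 =>
      -- prefix = 24 if prefix < 24
      let prefix1 : Int := if prefix0 < 24 then 24 else prefix0
      let parsed := ((PySem.Str.split? ip_part ".").getD []).map PySem.Int.ofStr?
      if parsed.all Option.isSome then
        match parsed.map (fun o => o.getD 0) with
        | ip0 :: ip1 :: ip2 :: ip3 :: _ =>
          let base_ip := (ip0 <<< (24:Nat)) + (ip1 <<< (16:Nat)) + (ip2 <<< (8:Nat)) + ip3
          if prefix1 ≤ 32 then
            let s : Nat := (32 - prefix1).toNat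
            let num_hosts : Int := 2 ^ s
            let network := PySem.Int.band base_ip ((4294967295 : Int) <<< s)
            (PySem.List.pyRange 1 (num_hosts - 1) 1).foldl (fun ips i =>
              ips ++ [PySem.Int.toStr (PySem.Int.band ((network + i) >>> (24:Nat)) 255) ++ "." ++
                      PySem.Int.toStr (PySem.Int.band ((network + i) >>> (16:Nat)) 255) ++ "." ++
                      PySem.Int.toStr (PySem.Int.band ((network + i) >>> (8:Nat)) 255) ++ "." ++
                      PySem.Int.toStr (PySem.Int.band (network + i) 255)]) []
          else []  -- Python: ValueError (negative shift count), outside Pre_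
        | _ => []  -- Python: IndexError, outside Pre_
      else []      -- Python: ValueError from int(), outside Pre_
    | none => []   -- Python: ValueError from int(), outside Pre_
  | _ => []        -- Python: unpack ValueError (list not of size 2), outside Pre_

-- ===== PORT B =====
def expand_cidr_alt (cidr : String) : List String :=
  if PySem.Str.isIn "/" cidr = false then [cidr] else
  let parts := (PySem.Str.split? cidr "/").getD []
  if parts.length == 2 then
    (PySem.Int.ofStr? parts[1]!).elim [] (fun p =>
      if max p 24 ≤ 32 then
        let size : Int := 2 ^ (32 - max p 24).toNat
        let os := ((PySem.Str.split? parts[0]! ".").getD []).map PySem.Int.ofStr?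
        if os.all Option.isSome && decide (4 ≤ os.length) then
          let octets := os.map (fun v => v.getD 0)
          let head := PySem.Str.join "." ((octets.take 3).map PySem.Int.toStr) ++ "."
          let low := octets[3]! - PySem.Int.mod octets[3]! size
          let block := (PySem.List.pyRange low (low + size) 1).map (fun n => head ++ PySem.Int.toStr n)
          PySem.List.slice block (some 1) (some (-1))    -- block[1:-1]
        else []  -- Python: ValueError from int() / IndexError, outside Pre_
      else [])   -- Python: TypeError (float-sized block), outside Pre_
  else []        -- Python: unpack ValueError, outside Pre_

-- ===== PRECONDITION & SPEC =====
-- Pre_ excludes (a) exactly the inputs where Python A raises: a cidr containing '/' must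
-- split into exactly two pieces, the prefix must parse as an int and (after clamping
-- to >= 24) be <= 32, and the address part must split into >= 4 pieces, all parsing as
-- ints; and (b) malformed addresses with one of the first four octets outside 0..255,
-- a corner no caller specifies, where A's accidental carry-and-wrap of the excess into
-- neighbouring octets and B's verbatim octets are equally defensible renderings.
def preOK_expand_cidr (cidr : String) : Bool :=
  if PySem.Str.isIn "/" cidr = false then true else
  let parts := (PySem.Str.split? cidr "/").getD []
  parts.length == 2 &&
  ((PySem.Int.ofStr? parts[1]!).elim false (fun p =>
    decide ((if p < 24 then (24 : Int) else p) ≤ 32) &&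
    (let os := ((PySem.Str.split? parts[0]! ".").getD []).map PySem.Int.ofStr?
     os.all Option.isSome && decide (4 ≤ os.length) &&
     (os.take 4).all (fun v => decide (0 ≤ v.getD 0) && decide (v.getD 0 ≤ 255)))))

def Pre_expand_cidr (cidr : String) : Prop := preOK_expand_cidr cidr = true
instance (cidr : String) : Decidable (Pre_expand_cidr cidr) := by
  unfold Pre_expand_cidr; infer_instance

def pvWitness_expand_cidr : String := "10.0.0.0/29"

def Spec_expand_cidr (cidr : String) (out : List String) : Prop := out = expand_cidr_alt cidr
instance (cidr : String) (out : List String) : Decidable (Spec_expand_cidr cidr out) := by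
  unfold Spec_expand_cidr; infer_instance

-- ===== CLAIM (what is proved, stated in full; the proofs are below) =====
def Claim_equal_expand_cidr : Prop :=
  ∀ (cidr : String), Dom_expand_cidr cidr → Pre_expand_cidr cidr →
    Spec_expand_cidr cidr (expand_cidr cidr)

-- ===== LEMMAS AND PROOFS =====

theorem pv_nat_and_mask (x w s : Nat) :
    x &&& ((2 ^ w - 1) <<< s) = x / 2 ^ s % 2 ^ w * 2 ^ s := by
  have h : x / 2 ^ s % 2 ^ w * 2 ^ s = ((x >>> s) % 2 ^ w) <<< s := by
    rw [Nat.shiftLeft_eq, Nat.shiftRight_eq_div_pow]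
  rw [h]
  apply Nat.eq_of_testBit_eq
  intro i
  simp only [Nat.testBit_and, Nat.testBit_shiftLeft, Nat.testBit_mod_two_pow,
    Nat.testBit_shiftRight, Nat.testBit_two_pow_sub_one]
  by_cases hi : s ≤ i
  · have : s + (i - s) = i := by omega
    simp [hi, this, ge_iff_le]
    by_cases h2 : i - s < w <;> simp [h2, Bool.and_comm]
  · simp [hi, ge_iff_le]

theorem pv_band255 (x : Int) (hx : 0 ≤ x) : PySem.Int.band x 255 = x % 256 := by
  rw [PySem.Int.band_of_nonneg hx (by norm_num)]
  have h : x.toNat &&& 255 = x.toNat % 256 := by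
    have := Nat.and_two_pow_sub_one_eq_mod x.toNat 8
    norm_num at this
    exact this
  have h2 : Int.toNat 255 = 255 := rfl
  rw [h2, h]
  omega

theorem pv_shr (x : Int) (k : Nat) (hx : 0 ≤ x) : x >>> k = x / 2 ^ k := by
  rcases Int.eq_ofNat_of_zero_le hx with ⟨m, rfl⟩
  have h1 : ((m : Int)) >>> k = ((m >>> k : Nat) : Int) := by simp
  rw [h1, Nat.shiftRight_eq_div_pow]
  push_cast
  rfl

theorem pv_ediv_negsucc (x t : Int) (ht : 0 < t) :
    (-(x + 1)) / t = -(x / t) - 1 := by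
  have hsplit : -(x + 1) = (t - 1 - x % t) + (-(x / t) - 1) * t := by
    have h : x % t + t * (x / t) = x := Int.emod_add_mul_ediv x t
    linear_combination h
  rw [hsplit, Int.add_mul_ediv_right _ _ (by omega : t ≠ 0)]
  have hr : (t - 1 - x % t) / t = 0 := by
    apply Int.ediv_eq_zero_of_lt <;>
      have := Int.emod_nonneg x (by omega : t ≠ 0) <;>
      have := Int.emod_lt_of_pos x ht <;> omega
  omega

theorem pv_band_mask (b : Int) (s : Nat) :
    PySem.Int.band b ((4294967295 : Int) <<< s) = ((b.fdiv (2 ^ s)).fmod (2 ^ 32)) * 2 ^ s := by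
  have hmask : ((4294967295 : Int) <<< s) = (((4294967295 <<< s : Nat) : Int)) := by simp
  have hMn : (4294967295 <<< s : Nat) = (2 ^ 32 - 1) <<< s := by norm_num
  have htpos : (0 : Int) < 2 ^ s := by positivity
  have hfdiv : ∀ a : Int, a.fdiv (2 ^ s) = a / 2 ^ s := by
    intro a; rw [Int.fdiv_eq_ediv]; simp [htpos.le]
  have hfmod : ∀ a : Int, a.fmod (2 ^ 32) = a % 2 ^ 32 := by
    intro a; rw [Int.fmod_eq_emod]; norm_num
  rw [hmask, hfdiv, hfmod]
  cases b with
  | ofNat m =>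
    rw [show ((Int.ofNat m) = ((m : Nat) : Int)) from rfl, PySem.Int.band_natCast]
    rw [hMn, pv_nat_and_mask]
    push_cast [Int.natCast_div]
    rfl
  | negSucc m =>
    have hneg : ¬ (0 : Int) ≤ Int.negSucc m := by omega
    have h1 : (-(Int.negSucc m) - 1) = (m : Int) := by rw [Int.negSucc_eq]; ring
    have hlhs : PySem.Int.band (Int.negSucc m) ((4294967295 <<< s : Nat) : Int)
        = (((4294967295 <<< s : Nat) - ((4294967295 <<< s : Nat) &&& m) : Nat) : Int) := by
      simp only [PySem.Int.band, h1]
      rw [if_neg hneg, if_pos (by positivity : (0:Int) ≤ ((4294967295 <<< s : Nat) : Int))]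
      simp only [Int.toNat_natCast]
    rw [hlhs]
    have hand : (4294967295 <<< s : Nat) &&& m = m / 2 ^ s % 2 ^ 32 * 2 ^ s := by
      rw [Nat.and_comm, hMn, pv_nat_and_mask]
    have hq : (m : Int) / 2 ^ s = ((m / 2 ^ s : Nat) : Int) := by
      rw [Int.natCast_div]; push_cast; rfl
    have hmodgen : ∀ q : Nat, (-(q : Int) - 1) % 2 ^ 32 = 2 ^ 32 - 1 - ((q % 2 ^ 32 : Nat) : Int) := by
      intro q; omega
    rw [hand, Int.negSucc_eq, pv_ediv_negsucc _ _ htpos, hq, hmodgen]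
    have hle : m / 2 ^ s % 2 ^ 32 * 2 ^ s ≤ 4294967295 <<< s := by
      rw [hMn, Nat.shiftLeft_eq]
      exact Nat.mul_le_mul_right _ (by have := Nat.mod_lt (m / 2 ^ s) (show 0 < 2^32 by norm_num); omega)
    rw [Nat.cast_sub hle, hMn, Nat.shiftLeft_eq]
    push_cast
    ring

set_option maxHeartbeats 1000000 in
theorem pv_elem (base i : Int) (s : Nat) (hs : s ≤ 8) (hi1 : 1 ≤ i) (hi2 : i ≤ 2 ^ s - 2) :
    (base / 2 ^ s % 2 ^ 32 * 2 ^ s + i) % 256 = base % 256 / 2 ^ s * 2 ^ s + i ∧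
    (base / 2 ^ s % 2 ^ 32 * 2 ^ s + i) / 256 % 256 = base / 256 % 256 ∧
    (base / 2 ^ s % 2 ^ 32 * 2 ^ s + i) / 65536 % 256 = base / 65536 % 256 ∧
    (base / 2 ^ s % 2 ^ 32 * 2 ^ s + i) / 16777216 % 256 = base / 16777216 % 256 := by
  interval_cases s <;> norm_num at hi2 ⊢ <;> omega

theorem pv_foldl_push {α β : Type} (f : α → β) (l : List α) (acc : List β) :
    l.foldl (fun ips i => ips ++ [f i]) acc = acc ++ l.map f := by
  induction l generalizing acc with
  | nil => simp
  | cons a l ih => simp [List.foldl_cons, ih]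

theorem pv_pyRange_one (a b : Int) :
    PySem.List.pyRange a b 1 = (List.range (b - a).toNat).map (fun k => a + (k : Int)) := by
  by_cases h : a < b
  · have hfm : ∀ l : List Nat,
        List.flatMap (fun k : Nat => [(k : Int)]) l = l.map (fun k : Nat => (k : Int)) := by
      intro l
      induction l with
      | nil => rfl
      | cons x xs ih => simp [List.flatMap_cons, ih]
    simp [PySem.List.pyRange, h]
    rw [hfm, List.map_map]
    rfl
  · have : (b - a).toNat = 0 := by omega
    simp [PySem.List.pyRange, h, this]

theorem pv_master (o0 o1 o2 o3 : Int) (s : Nat) (hs : s ≤ 8) :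
    (PySem.List.pyRange 1 ((2 : Int) ^ s - 1) 1).foldl (fun ips i =>
        ips ++ [PySem.Int.toStr (PySem.Int.band ((PySem.Int.band ((o0 <<< (24:Nat)) + (o1 <<< (16:Nat)) + (o2 <<< (8:Nat)) + o3) ((4294967295 : Int) <<< s) + i) >>> (24:Nat)) 255) ++ "." ++
                PySem.Int.toStr (PySem.Int.band ((PySem.Int.band ((o0 <<< (24:Nat)) + (o1 <<< (16:Nat)) + (o2 <<< (8:Nat)) + o3) ((4294967295 : Int) <<< s) + i) >>> (16:Nat)) 255) ++ "." ++
                PySem.Int.toStr (PySem.Int.band ((PySem.Int.band ((o0 <<< (24:Nat)) + (o1 <<< (16:Nat)) + (o2 <<< (8:Nat)) + o3) ((4294967295 : Int) <<< s) + i) >>> (8:Nat)) 255) ++ "." ++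
                PySem.Int.toStr (PySem.Int.band (PySem.Int.band ((o0 <<< (24:Nat)) + (o1 <<< (16:Nat)) + (o2 <<< (8:Nat)) + o3) ((4294967295 : Int) <<< s) + i) 255)]) []
    = (PySem.List.pyRange
         (PySem.Int.floordiv (PySem.Int.mod o3 256) ((2 : Int) ^ s) * (2 : Int) ^ s + 1)
         (PySem.Int.floordiv (PySem.Int.mod o3 256) ((2 : Int) ^ s) * (2 : Int) ^ s + (2 : Int) ^ s - 1) 1).map
        (fun n =>
          PySem.Int.toStr (PySem.Int.mod (PySem.Int.floordiv (o0 * 65536 + o1 * 256 + o2 + PySem.Int.floordiv o3 256) 65536) 256) ++ "." ++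
          PySem.Int.toStr (PySem.Int.mod (PySem.Int.floordiv (o0 * 65536 + o1 * 256 + o2 + PySem.Int.floordiv o3 256) 256) 256) ++ "." ++
          PySem.Int.toStr (PySem.Int.mod (o0 * 65536 + o1 * 256 + o2 + PySem.Int.floordiv o3 256) 256) ++ "." ++
          PySem.Int.toStr n) := by
  have htpos : (0 : Int) < 2 ^ s := by positivity
  have hfd : ∀ a b : Int, 0 < b → PySem.Int.floordiv a b = a / b := by
    intro a b hb
    rw [PySem.Int.floordiv, Int.fdiv_eq_ediv]
    simp [hb.le]
  have hfm : ∀ a b : Int, 0 < b → PySem.Int.mod a b = a % b := by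
    intro a b hb
    rw [PySem.Int.mod, Int.fmod_eq_emod]
    simp [hb.le]
  have hb : (o0 <<< (24:Nat)) + (o1 <<< (16:Nat)) + (o2 <<< (8:Nat)) + o3
      = o0 * 16777216 + o1 * 65536 + o2 * 256 + o3 := by
    rw [Int.shiftLeft_eq, Int.shiftLeft_eq, Int.shiftLeft_eq]
    norm_num
  set base : Int := o0 * 16777216 + o1 * 65536 + o2 * 256 + o3 with hbase
  have hnet : PySem.Int.band ((o0 <<< (24:Nat)) + (o1 <<< (16:Nat)) + (o2 <<< (8:Nat)) + o3) ((4294967295 : Int) <<< s)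
      = (base / 2 ^ s % 2 ^ 32) * 2 ^ s := by
    rw [hb, pv_band_mask, Int.fdiv_eq_ediv, Int.fmod_eq_emod]
    simp [htpos.le]
  set W : Int := base / 2 ^ s % 2 ^ 32 with hW
  have hW0 : 0 ≤ W := Int.emod_nonneg _ (by norm_num)
  have hh : o0 * 65536 + o1 * 256 + o2 + PySem.Int.floordiv o3 256 = base / 256 := by
    rw [hfd _ _ (by norm_num)]
    omega
  have hlow : PySem.Int.floordiv (PySem.Int.mod o3 256) ((2:Int) ^ s) * (2:Int) ^ s
      = base % 256 / 2 ^ s * 2 ^ s := by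
    rw [hfd _ _ htpos, hfm _ _ (by norm_num)]
    have h3 : o3 % 256 = base % 256 := by omega
    rw [h3]
  rw [pv_foldl_push, hnet, hh, hlow, pv_pyRange_one, pv_pyRange_one, List.nil_append]
  rw [show ((2:Int) ^ s - 1 - 1) = 2 ^ s - 2 by ring,
      show (base % 256 / 2 ^ s * 2 ^ s + 2 ^ s - 1 - (base % 256 / 2 ^ s * 2 ^ s + 1)) = 2 ^ s - 2 by ring]
  rw [List.map_map, List.map_map]
  apply List.map_congr_left
  intro k hk
  obtain ⟨a, ha, rfl⟩ : ∃ a : Nat, a ∈ List.range ((2:Int)^s - 2).toNat ∧ k = ((a : Int)) := by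
    simpa using hk
  simp only [List.mem_range] at ha
  have hkT : ((a : Nat) : Int) ≤ 2 ^ s - 3 := by omega
  simp only [Function.comp_apply]
  set i : Int := 1 + ((a : Nat) : Int) with hi
  have hi1 : 1 ≤ i := by omega
  have hi2 : i ≤ 2 ^ s - 2 := by omega
  have hWs : 0 ≤ W * 2 ^ s := mul_nonneg hW0 htpos.le
  have hWn : 0 ≤ W * 2 ^ s + i := by omega
  obtain ⟨e4, e3, e2, e1⟩ := pv_elem base i s hs hi1 hi2
  rw [← hW] at e1 e2 e3 e4
  rw [pv_shr _ _ hWn, pv_shr _ _ hWn, pv_shr _ _ hWn,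
      pv_band255 _ (Int.ediv_nonneg hWn (by norm_num)),
      pv_band255 _ (Int.ediv_nonneg hWn (by norm_num)),
      pv_band255 _ (Int.ediv_nonneg hWn (by norm_num)),
      pv_band255 _ hWn]
  rw [hfm _ _ (by norm_num), hfm _ _ (by norm_num), hfm _ _ (by norm_num),
      hfd _ _ (by norm_num), hfd _ _ (by norm_num)]
  rw [show (2:Int) ^ 8 = 256 by norm_num, show (2:Int) ^ 16 = 65536 by norm_num,
      show (2:Int) ^ 24 = 16777216 by norm_num]
  rw [e4, e3, e2, e1]
  have hdd : base / 256 / 256 = base / 65536 := by omega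
  have hdd2 : base / 256 / 65536 = base / 16777216 := by omega
  rw [hdd, hdd2]
  have harg : base % 256 / 2 ^ s * 2 ^ s + i = base % 256 / 2 ^ s * 2 ^ s + 1 + ((a : Nat) : Int) := by
    omega
  rw [harg]

-- join "." [x, y, z] concatenates with dots
theorem pv_join3 (x y z : String) :
    PySem.Str.join "." [x, y, z] = x ++ "." ++ y ++ "." ++ z := by
  apply String.toList_injective
  simp [PySem.Str.join, PySem.Chars.join, List.intercalate]

theorem pv_slice_tail {α : Type} (x : α) (l : List α) :
    PySem.List.slice (x :: l) (some 1) (some (-1)) = l.dropLast := by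
  have h1 : PySem.List.clampIdx (l.length + 1) 1 = 1 := by
    simp [PySem.List.clampIdx]
  have h2 : PySem.List.clampIdx (l.length + 1) (-1) = l.length := by
    simp only [PySem.List.clampIdx, if_pos (by norm_num : (-1 : Int) < 0)]
    rw [if_neg (by omega)]
    omega
  simp only [PySem.List.slice, List.length_cons, h1, h2]
  rw [List.dropLast_eq_take]
  simp

-- l[1:-1] on a mapped integer range drops the two endpoint values
theorem pv_slice_mid {α : Type} (f : Int → α) (a b : Int) (hab : a ≤ b) :
    PySem.List.slice ((PySem.List.pyRange a b 1).map f) (some 1) (some (-1))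
      = (PySem.List.pyRange (a + 1) (b - 1) 1).map f := by
  by_cases h : a < b
  · rw [PySem.List.pyRange_one_cons h, List.map_cons, pv_slice_tail]
    by_cases h2 : a + 1 < b
    · have hsucc : b = (b - 1) + 1 := by ring
      rw [hsucc, PySem.List.pyRange_one_succ_right (by omega),
          show b - 1 + 1 - 1 = b - 1 by ring]
      simp
    · rw [PySem.List.pyRange_one_eq_nil (by omega : b ≤ a + 1),
          PySem.List.pyRange_one_eq_nil (by omega : b - 1 ≤ a + 1)]
      simp
  · rw [PySem.List.pyRange_one_eq_nil (by omega), PySem.List.pyRange_one_eq_nil (by omega)]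
    simp [PySem.List.slice]

-- ===== VERDICT (by name: the statement is the Claim_ definition above) =====
theorem expand_cidr_spec : Claim_equal_expand_cidr := by
  intro cidr _ hpre
  unfold Spec_expand_cidr
  unfold Pre_expand_cidr preOK_expand_cidr at hpre
  unfold expand_cidr expand_cidr_alt
  by_cases hc : PySem.Str.isIn "/" cidr = false
  · rw [if_pos hc, if_pos hc]
  rw [if_neg hc] at hpre ⊢
  rw [if_neg hc]
  simp only [] at hpre ⊢
  rcases h1 : PySem.Str.split? cidr "/" with _ | parts <;> rw [h1] at hpre
  · simp at hpre
  rcases parts with _ | ⟨ip, rest⟩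
  · simp at hpre
  rcases rest with _ | ⟨prefStr, rest2⟩
  · simp at hpre
  rcases rest2 with _ | ⟨x, rest3⟩
  swap
  · simp at hpre
  simp only [Option.getD_some, List.length_cons, List.length_nil] at hpre ⊢
  rcases h2 : PySem.Int.ofStr? ([ip, prefStr][1]!) with _ | p <;> rw [h2] at hpre
  · simp at hpre
  have h2' : PySem.Int.ofStr? prefStr = some p := by simpa using h2
  simp only [Option.elim_some] at hpre
  simp only [show ([ip, prefStr][0]!) = ip from rfl, h2'] at hpre ⊢
  simp only [Bool.and_eq_true, decide_eq_true_eq] at hpre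
  obtain ⟨-, h32, ⟨hall, hlen⟩, hrange⟩ := hpre
  have hlenL : 4 ≤ ((PySem.Str.split? ip ".").getD []).length := by simpa using hlen
  rcases hL : (PySem.Str.split? ip ".").getD [] with _ | ⟨l0, _ | ⟨l1, _ | ⟨l2, _ | ⟨l3, lt⟩⟩⟩⟩ <;>
    rw [hL] at hlenL <;> try (exfalso; simp at hlenL; done)
  have c1 : (List.map PySem.Int.ofStr? (l0 :: l1 :: l2 :: l3 :: lt)).all Option.isSome = true := by
    have h := hall
    rw [hL] at h
    simpa using h
  have c2 : decide (4 ≤ (List.map PySem.Int.ofStr? (l0 :: l1 :: l2 :: l3 :: lt)).length) = true := by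
    simp
  have hpfx : (if p < 24 then (24 : Int) else p) = max p 24 := by
    rcases le_or_gt 24 p with h | h
    · rw [if_neg (by omega), max_eq_left h]
    · rw [if_pos h, max_eq_right (by omega)]
  rw [hpfx] at h32
  have hs8 : (32 - max p 24).toNat ≤ 8 := by
    have : 24 ≤ max p 24 := le_max_right _ _
    omega
  simp only [c1, c2, hpfx, h32, Bool.and_self, if_true, Option.elim_some]
  simp only [List.map_cons, List.map_nil, List.getElem!_cons_zero, List.getElem!_cons_succ,
    List.take_succ_cons, List.take_zero]
  set o0 : Int := (PySem.Int.ofStr? l0).getD 0 with e0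
  set o1 : Int := (PySem.Int.ofStr? l1).getD 0 with e1
  set o2 : Int := (PySem.Int.ofStr? l2).getD 0 with e2
  set o3 : Int := (PySem.Int.ofStr? l3).getD 0 with e3
  rw [pv_master o0 o1 o2 o3 ((32 - max p 24).toNat) hs8, pv_join3]
  set s : Nat := (32 - max p 24).toNat with hsdef
  have hpow1 : (1 : Int) ≤ 2 ^ s := one_le_pow₀ (by norm_num)
  rw [pv_slice_mid _ _ _ (by omega : o3 - PySem.Int.mod o3 (2 ^ s) ≤ o3 - PySem.Int.mod o3 (2 ^ s) + 2 ^ s)]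
  -- decide which side of ¬D_ we are on
  -- all four octets are in 0..255, from Pre_
  have hr := hrange
  rw [hL] at hr
  simp only [List.map_cons, List.take_succ_cons, List.take_zero, List.all_cons, List.all_nil,
  Bool.and_eq_true, decide_eq_true_eq, and_true] at hr
  have hb0 : 0 ≤ o0 ∧ o0 ≤ 255 := by rw [e0]; exact ⟨hr.1.1, hr.1.2⟩
  have hb1 : 0 ≤ o1 ∧ o1 ≤ 255 := by rw [e1]; exact ⟨hr.2.1.1, hr.2.1.2⟩
  have hb2 : 0 ≤ o2 ∧ o2 ≤ 255 := by rw [e2]; exact ⟨hr.2.2.1.1, hr.2.2.1.2⟩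
  have hb3 : 0 ≤ o3 ∧ o3 ≤ 255 := by rw [e3]; exact ⟨hr.2.2.2.1, hr.2.2.2.2⟩
  have htpos : (0 : Int) < 2 ^ s := by positivity
  have hfd : ∀ a b : Int, 0 < b → PySem.Int.floordiv a b = a / b := by
    intro a b hb
    rw [PySem.Int.floordiv, Int.fdiv_eq_ediv]
    simp [hb.le]
  have hfm : ∀ a b : Int, 0 < b → PySem.Int.mod a b = a % b := by
    intro a b hb
    rw [PySem.Int.mod, Int.fmod_eq_emod]
    simp [hb.le]
  have hlow : PySem.Int.floordiv (PySem.Int.mod o3 256) ((2:Int) ^ s) * (2:Int) ^ s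
      = o3 - PySem.Int.mod o3 ((2:Int) ^ s) := by
    rw [hfd _ _ htpos, hfm _ _ (by norm_num), hfm _ _ htpos]
    have h3 : o3 % 256 = o3 := by omega
    rw [h3]
    have h := Int.ediv_add_emod o3 ((2:Int) ^ s)
    linarith [mul_comm (o3 / (2:Int) ^ s) ((2:Int) ^ s)]
  have hh0 : PySem.Int.mod (PySem.Int.floordiv (o0 * 65536 + o1 * 256 + o2 + PySem.Int.floordiv o3 256) 65536) 256 = o0 := by
    rw [hfd _ _ (by norm_num), hfd _ _ (by norm_num), hfm _ _ (by norm_num)]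
    omega
  have hh1 : PySem.Int.mod (PySem.Int.floordiv (o0 * 65536 + o1 * 256 + o2 + PySem.Int.floordiv o3 256) 256) 256 = o1 := by
    rw [hfd _ _ (by norm_num), hfd _ _ (by norm_num), hfm _ _ (by norm_num)]
    omega
  have hh2 : PySem.Int.mod (o0 * 65536 + o1 * 256 + o2 + PySem.Int.floordiv o3 256) 256 = o2 := by
    rw [hfd _ _ (by norm_num), hfm _ _ (by norm_num)]
    omega
  rw [hlow, hh0, hh1, hh2]
  norm_num
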